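-- pv_equiv track=rewrite | github.com/wormeyman/FactorioWikiDamageThresholds | factorio_thresholds.py | _ewd_cumulative_costs
-- ===== SOURCE A (Python) =====
-- def _si(n: int) -> str:
--     """Format an integer with SI suffix (k, M, G, T), dropping trailing zeros."""
--     if n < 1_000:
--         return str(n)
--     if n < 1_000_000:
--         return f'{n / 1_000:.2f}'.rstrip('0').rstrip('.') + 'k'
--     if n < 1_000_000_000:
--         return f'{n / 1_000_000:.3f}'.rstrip('0').rstrip('.') + 'M'
--     if n < 1_000_000_000_000:
--         return f'{n / 1_000_000_000:.3f}'.rstrip('0').rstrip('.') + 'G'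
--     return f'{n / 1_000_000_000_000:.3f}'.rstrip('0').rstrip('.') + 'T'
--
-- def _ewd_cumulative_costs(max_lvl: int = 20) -> dict:
--     """Cumulative total science pack cost to REACH each electric weapons damage level.
--
--     Level 1: Auto+Log+Mil+Chem+Util × 250 (5 types).
--     Level 2: +Space × 500 (6 types).
--     Level 3+: +EM × 1000 × 2^(level-3) (7 types).
--     """
--     total = 0
--     result: dict = {0: '-'}
--     for lvl in range(1, max_lvl + 1):
--         if lvl == 1:
--             per_level = 5 * 250
--         elif lvl == 2:
--             per_level = 6 * 500
--         else:
--             per_level = 7 * 1000 * (2 ** (lvl - 3))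
--         total += per_level
--         result[lvl] = _si(total)
--     return result
-- ===== SOURCE B (Python) =====
-- def _si_b(n: int) -> str:
--     """SI-format n via a scale table: pick the first fitting divisor, format the
--     float once, split off the fixed-width fraction and strip its trailing zeros."""
--     if n < 1000:
--         return str(n)
--     for div, p, suf in ((1_000, 2, 'k'), (1_000_000, 3, 'M'), (1_000_000_000, 3, 'G')):
--         if n < 1000 * div:
--             break
--     else:
--         div, p, suf = 1_000_000_000_000, 3, 'T'
--     s = f'{n / div:.{p}f}'
--     frac = s[-p:].rstrip('0')
--     return s[:-(p + 1)] + ('.' + frac if frac else '') + suf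
--
-- def _cum(lvl: int) -> int:
--     """Closed-form cumulative science cost to reach lvl (geometric series for 3+)."""
--     if lvl == 1:
--         return 1250
--     if lvl == 2:
--         return 4250
--     return 4250 + 7000 * ((1 << (lvl - 2)) - 1)
--
-- def _ewd_cumulative_costs(max_lvl: int = 20) -> dict:
--     return {0: '-', **{lvl: _si_b(_cum(lvl)) for lvl in range(1, max_lvl + 1)}}
-- ===== Notes on version B (the rewrite author's own statement) =====
-- stated objective: alternative
-- what changed: B drops A's running `total` accumulator in favour of a closed-form cumulative cost per level (a geometric-series sum) inside a dict comprehension, and replaces A's if-chain SI formatter by a table-driven one that formats once and strips trailing zeros from the fixed-width fraction slice only.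
-- outside the precondition, e.g. on _ewd_cumulative_costs(1054): A raises OverflowError, B raises OverflowError
import Mathlib
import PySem

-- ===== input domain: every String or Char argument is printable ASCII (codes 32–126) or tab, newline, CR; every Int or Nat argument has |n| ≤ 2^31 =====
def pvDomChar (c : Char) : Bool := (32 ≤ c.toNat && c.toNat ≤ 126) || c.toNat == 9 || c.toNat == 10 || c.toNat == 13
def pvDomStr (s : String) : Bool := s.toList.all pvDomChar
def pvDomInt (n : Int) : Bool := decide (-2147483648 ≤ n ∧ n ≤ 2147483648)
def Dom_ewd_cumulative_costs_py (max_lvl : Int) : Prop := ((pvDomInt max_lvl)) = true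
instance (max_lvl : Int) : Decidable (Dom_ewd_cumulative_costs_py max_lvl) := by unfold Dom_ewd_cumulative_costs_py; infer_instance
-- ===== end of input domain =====

-- B replaces A's running `total` accumulator with a closed-form per-level cumulative
-- cost inside a dict comprehension, and A's if-chain SI formatter with a table-driven
-- one that strips zeros from the fraction slice only (objective: alternative).

-- shared primitive (used by BOTH ports): exact integer emulation of the digit string of
-- Python's f'{n/d:.pf}' for 1 ≤ d ≤ n.  Python computes n/d as a correctly-rounded
-- IEEE-754 binary64 and formats it round-half-even to p decimals; both steps are emulated
-- exactly with integer arithmetic (hand-ported; exact whenever n/d fits a float — inputs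
-- whose totals overflow the float range are excluded by Pre_).

-- round a/b to the nearest integer, ties to even (a, b > 0)
def pyRhe (a b : Nat) : Nat :=
  let q := a / b
  let r := a % b
  if b < 2 * r then q + 1 else if 2 * r < b then q else if q % 2 = 0 then q else q + 1

-- the integer f'{n/d:.pf}' prints (the double nearest n/d, times 10^p, rounded half-even)
def pyFmtInt (n d p : Nat) : Nat :=
  -- the binary64 nearest to n/d is m * 2^(k-53) with 2^(k-1) ≤ n/d < 2^k
  let k := (n / d).log2 + 1
  let m0 := if k ≤ 53 then pyRhe (n <<< (53 - k)) d else pyRhe n (d <<< (k - 53))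
  let mk : Nat × Nat := if m0 = 2 ^ 53 then (2 ^ 52, k + 1) else (m0, k)
  if mk.2 ≤ 53 then pyRhe (mk.1 * 10 ^ p) (2 ^ (53 - mk.2)) else (mk.1 * 10 ^ p) <<< (mk.2 - 53)

-- its digit list, left-padded with '0' to length ≥ p+1
def pyPad (ds : List Char) (p : Nat) : List Char :=
  if ds.length < p + 1 then List.replicate (p + 1 - ds.length) '0' ++ ds else ds

def pyFmtDigits (n d p : Nat) : List Char :=
  pyPad (PySem.Int.toStr ((pyFmtInt n d p : Nat) : Int)).toList p

-- the chars of f'{n/d:.pf}' (decimal point inserted before the last p digits)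
def pyFmt (n d p : Nat) : List Char :=
  let ds := pyFmtDigits n d p
  ds.take (ds.length - p) ++ '.' :: ds.drop (ds.length - p)

-- ===== PORT A =====
-- .rstrip('0').rstrip('.')
def pyStrip (l : List Char) : List Char :=
  ((l.reverse.dropWhile (· == '0')).dropWhile (· == '.')).reverse

def pySi (n : Int) : String :=
  if n < 1000 then PySem.Int.toStr n
  else if n < 1000000 then String.ofList (pyStrip (pyFmt n.toNat 1000 2)) ++ "k"
  else if n < 1000000000 then String.ofList (pyStrip (pyFmt n.toNat 1000000 3)) ++ "M"
  else if n < 1000000000000 then String.ofList (pyStrip (pyFmt n.toNat 1000000000 3)) ++ "G"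
  else String.ofList (pyStrip (pyFmt n.toNat 1000000000000 3)) ++ "T"

-- one iteration of A's loop body (lvl ≥ 1 always, so (lvl-3).toNat is exact for the branch reached)
def ewdStep (st : Int × PySem.Dict Int String) (lvl : Int) : Int × PySem.Dict Int String :=
  let per : Int := if lvl = 1 then 5 * 250 else if lvl = 2 then 6 * 500
                   else 7 * 1000 * (2 ^ ((lvl - 3).toNat))
  let total := st.1 + per
  (total, st.2.insert lvl (pySi total))

def ewd_cumulative_costs_py (max_lvl : Int) : List (Int × String) :=
  (((PySem.List.pyRange 1 (max_lvl + 1) 1).foldl ewdStep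
      (0, PySem.Dict.empty.insert 0 "-")).2).items

-- ===== PORT B =====
-- B's scale table; the for/break/else picks the first fitting row, defaulting to 'T'
def siTable : List (Int × Nat × String) := [(1000, 2, "k"), (1000000, 3, "M"), (1000000000, 3, "G")]

def siSelect (n : Int) : Int × Nat × String :=
  match siTable.find? (fun e => decide (n < 1000 * e.1)) with
  | some e => e
  | none => (1000000000000, 3, "T")

-- B's _si_b: format once, take the fraction slice, rstrip it, reassemble
def siB (n : Int) : String :=
  if n < 1000 then PySem.Int.toStr n
  else
    let e := siSelect n
    let s := pyFmt n.toNat e.1.toNat e.2.1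
    let frac := ((PySem.List.slice s (some (-(e.2.1 : Int))) none).reverse.dropWhile (· == '0')).reverse
    let head := PySem.List.slice s none (some (-((e.2.1 : Int) + 1)))
    String.ofList (head ++ (if frac ≠ [] then '.' :: frac else [])) ++ e.2.2

-- closed-form cumulative cost (B's _cum)
def ewdCum (lvl : Int) : Int :=
  if lvl = 1 then 1250 else if lvl = 2 then 4250
  else 4250 + 7000 * (2 ^ ((lvl - 2).toNat) - 1)

-- {0:'-', **{lvl: _si_b(_cum(lvl)) for lvl in range(1, max_lvl+1)}} — keys 0,1,… distinct
def ewd_cumulative_costs_py_alt (max_lvl : Int) : List (Int × String) :=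
  (0, "-") :: (PySem.List.pyRange 1 (max_lvl + 1) 1).map (fun lvl => (lvl, siB (ewdCum lvl)))

-- ===== PRECONDITION & SPEC =====
-- Pre_ excludes max_lvl ≥ 1054, on which A raises OverflowError: from level 1054 the
-- cumulative total is too large to convert to a Python float inside _si (B raises there too).
def Pre_ewd_cumulative_costs_py (max_lvl : Int) : Prop := max_lvl ≤ 1053
instance (max_lvl : Int) : Decidable (Pre_ewd_cumulative_costs_py max_lvl) := by unfold Pre_ewd_cumulative_costs_py; infer_instance

def pvWitness_ewd_cumulative_costs_py : Int := 20

def Spec_ewd_cumulative_costs_py (max_lvl : Int) (out : List (Int × String)) : Prop := out = ewd_cumulative_costs_py_alt max_lvl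
instance (max_lvl : Int) (out : List (Int × String)) : Decidable (Spec_ewd_cumulative_costs_py max_lvl out) := by unfold Spec_ewd_cumulative_costs_py; infer_instance

-- ===== CLAIM (what is proved, stated in full; the proofs are below) =====
def Claim_equal_ewd_cumulative_costs_py : Prop := ∀ (max_lvl : Int), Dom_ewd_cumulative_costs_py max_lvl → Pre_ewd_cumulative_costs_py max_lvl → Spec_ewd_cumulative_costs_py max_lvl (ewd_cumulative_costs_py max_lvl)

-- ===== LEMMAS AND PROOFS =====

lemma digitChar_ne_dot (m : Nat) : Nat.digitChar m ≠ '.' := by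
  by_cases h16 : m < 17
  · interval_cases m <;> decide
  · unfold Nat.digitChar
    repeat rw [if_neg (by omega)]
    decide

lemma toDigitsCore_ne_dot : ∀ (f n : Nat) (l : List Char), (∀ c ∈ l, c ≠ '.') →
    ∀ c ∈ Nat.toDigitsCore 10 f n l, c ≠ '.' := by
  intro f
  induction f with
  | zero => intro n l hl; simpa [Nat.toDigitsCore] using hl
  | succ f ih =>
      intro n l hl c hc
      simp only [Nat.toDigitsCore] at hc
      split at hc
      · rcases List.mem_cons.mp hc with h | h
        · subst h; exact digitChar_ne_dot _
        · exact hl _ h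
      · exact ih _ _ (by
          intro c' hc'
          rcases List.mem_cons.mp hc' with h | h
          · subst h; exact digitChar_ne_dot _
          · exact hl _ h) c hc

lemma toStr_nat_ne_dot (y : Nat) : ∀ c ∈ (PySem.Int.toStr ((y : Nat) : Int)).toList, c ≠ '.' := by
  rw [PySem.Int.toList_toStr]
  simp only [PySem.Int.toChars, show ¬(((y : Nat) : Int) < 0) by omega, if_false,
    Int.toNat_natCast]
  exact toDigitsCore_ne_dot _ _ _ (by simp)

lemma fmtDigits_ne_dot (n d p : Nat) : ∀ c ∈ pyFmtDigits n d p, c ≠ '.' := by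
  intro c hc
  unfold pyFmtDigits pyPad at hc
  split at hc
  · rcases List.mem_append.mp hc with h | h
    · have := List.eq_of_mem_replicate h; subst this; decide
    · exact toStr_nat_ne_dot _ c h
  · exact toStr_nat_ne_dot _ c hc

lemma fmtDigits_len (n d p : Nat) : p + 1 ≤ (pyFmtDigits n d p).length := by
  unfold pyFmtDigits pyPad
  split <;> rename_i h
  · simp only [List.length_append, List.length_replicate]; omega
  · omega

-- rstrip('0').rstrip('.') of 'h ++ . ++ f' = h plus the zero-stripped fraction (dot-free digits)
lemma strip_insert_dot (h f : List Char) (hh : ∀ c ∈ h, c ≠ '.')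
    (hf : ∀ c ∈ f, c ≠ '.') :
    pyStrip (h ++ '.' :: f)
      = h ++ (if (f.reverse.dropWhile (· == '0')).reverse ≠ []
              then '.' :: (f.reverse.dropWhile (· == '0')).reverse else []) := by
  unfold pyStrip
  have hrev : (h ++ '.' :: f).reverse = f.reverse ++ '.' :: h.reverse := by simp
  rw [hrev, List.dropWhile_append]
  by_cases hfe : f.reverse.dropWhile (· == '0') = []
  · simp only [hfe, List.isEmpty_nil, if_true, List.reverse_nil, ne_eq, not_true_eq_false,
      if_false, List.append_nil]
    have hdw1 : List.dropWhile (fun c => c == '0') ('.' :: h.reverse) = '.' :: h.reverse := by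
      rw [List.dropWhile_cons_of_neg]; decide
    rw [hdw1]
    have hdw2 : List.dropWhile (fun c => c == '.') ('.' :: h.reverse) =
        List.dropWhile (fun c => c == '.') h.reverse := by
      rw [List.dropWhile_cons_of_pos]; decide
    rw [hdw2]
    have : List.dropWhile (fun c => c == '.') h.reverse = h.reverse := by
      cases hr : h.reverse with
      | nil => simp
      | cons a t =>
          rw [List.dropWhile_cons_of_neg]
          have ha : a ∈ h := by
            have : a ∈ h.reverse := by rw [hr]; exact List.mem_cons_self
            simpa using this
          simp [hh a ha]
    rw [this, List.reverse_reverse]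
  · have hne' : (f.reverse.dropWhile (· == '0')).isEmpty = false := by
      simpa [List.isEmpty_iff] using hfe
    simp only [hne', Bool.false_eq_true, if_false]
    obtain ⟨a, t, hat⟩ := List.exists_cons_of_ne_nil hfe
    have ha : a ∈ f := by
      have ham : a ∈ f.reverse.dropWhile (· == '0') := by
        rw [hat]; exact List.mem_cons_self
      have : a ∈ f.reverse := (List.dropWhile_sublist _).mem ham
      simpa using this
    have hdw : List.dropWhile (fun c => c == '.')
        (f.reverse.dropWhile (· == '0') ++ '.' :: h.reverse)
        = f.reverse.dropWhile (· == '0') ++ '.' :: h.reverse := by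
      rw [hat, List.cons_append, List.dropWhile_cons_of_neg (by simp [hf a ha])]
    rw [hdw]
    simp [hfe]

-- B's else-branch equals A's strip of the same formatted string, for any selected row
lemma siB_branch (n : Int) (h0 : ¬ n < 1000) (d : Int) (p : Nat) (suf : String)
    (hsel : siSelect n = (d, p, suf)) (hp : 0 < p) :
    siB n = String.ofList (pyStrip (pyFmt n.toNat d.toNat p)) ++ suf := by
  unfold siB
  rw [if_neg h0]
  simp only [hsel]
  set ds := pyFmtDigits n.toNat d.toNat p with hds
  have hlen : p + 1 ≤ ds.length := by rw [hds]; exact fmtDigits_len n.toNat d.toNat p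
  have hdot := fmtDigits_ne_dot n.toNat d.toNat p
  have hfmt : pyFmt n.toNat d.toNat p
      = ds.take (ds.length - p) ++ '.' :: ds.drop (ds.length - p) := by
    rw [pyFmt]
  have hhl : (ds.take (ds.length - p)).length = ds.length - p := by simp
  have hslen : (pyFmt n.toNat d.toNat p).length = ds.length + 1 := by
    rw [hfmt]; simp
  have e1 : PySem.List.slice (pyFmt n.toNat d.toNat p) none (some (-((p : Int) + 1)))
      = ds.take (ds.length - p) := by
    have hc : (-((p : Int) + 1)) = -(((p + 1 : Nat) : Int)) := by push_cast; ring
    rw [hc, PySem.List.slice_to_neg_natCast _ _ (by omega), hslen, hfmt]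
    exact List.take_left' (by rw [hhl]; omega)
  have e2 : PySem.List.slice (pyFmt n.toNat d.toNat p) (some (-(p : Int))) none
      = ds.drop (ds.length - p) := by
    rw [PySem.List.slice_from_neg_natCast _ _ hp, hslen, hfmt]
    have h1 : ds.length + 1 - p = (ds.take (ds.length - p)).length + 1 := by
      rw [hhl]; omega
    rw [h1, ← List.drop_drop, List.drop_left]
    simp
  rw [e1, e2, hfmt,
    strip_insert_dot _ _
      (fun c hc => hdot c (List.mem_of_mem_take hc))
      (fun c hc => hdot c (List.mem_of_mem_drop hc))]

-- the two formatters agree on every integer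
lemma si_eq (n : Int) : pySi n = siB n := by
  by_cases h0 : n < 1000
  · unfold pySi siB; simp [h0]
  · by_cases h1 : n < 1000000
    · rw [siB_branch n h0 1000 2 "k"
        (by unfold siSelect siTable; norm_num [List.find?, h1]) (by omega)]
      unfold pySi
      rw [if_neg h0, if_pos h1]
      rfl
    · by_cases h2 : n < 1000000000
      · rw [siB_branch n h0 1000000 3 "M"
          (by unfold siSelect siTable; norm_num [List.find?, h1, h2]) (by omega)]
        unfold pySi
        rw [if_neg h0, if_neg h1, if_pos h2]
        rfl
      · by_cases h3 : n < 1000000000000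
        · rw [siB_branch n h0 1000000000 3 "G"
            (by unfold siSelect siTable; norm_num [List.find?, h1, h2, h3]) (by omega)]
          unfold pySi
          rw [if_neg h0, if_neg h1, if_neg h2, if_pos h3]
          rfl
        · rw [siB_branch n h0 1000000000000 3 "T"
            (by unfold siSelect siTable; norm_num [List.find?, h1, h2, h3]) (by omega)]
          unfold pySi
          rw [if_neg h0, if_neg h1, if_neg h2, if_neg h3]
          rfl

lemma ewd_total_step (n : Nat) :
    (if n = 0 then (0 : Int) else ewdCum (n : Int)) +
      (if ((n : Int) + 1) = 1 then (5 * 250 : Int) else if ((n : Int) + 1) = 2 then 6 * 500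
       else 7 * 1000 * (2 ^ ((((n : Int) + 1) - 3).toNat)))
    = ewdCum ((n : Int) + 1) := by
  match n with
  | 0 => decide
  | 1 => decide
  | (m + 2) =>
      have h1 : ((m + 2 : Nat) : Int) + 1 ≠ 1 := by push_cast; omega
      have h2 : ((m + 2 : Nat) : Int) + 1 ≠ 2 := by push_cast; omega
      have h3 : ((m + 2 : Nat) : Int) ≠ 1 := by push_cast; omega
      have e1 : ((((m + 2 : Nat) : Int) + 1) - 3).toNat = m := by push_cast; omega
      have e2 : ((((m + 2 : Nat) : Int) + 1) - 2).toNat = m + 1 := by push_cast; omega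
      have e3 : (((m + 2 : Nat) : Int) - 2).toNat = m := by push_cast; omega
      by_cases hm : m = 0
      · subst hm; decide
      · have h4 : ((m + 2 : Nat) : Int) ≠ 2 := by push_cast; omega
        have h0 : (m + 2 : Nat) ≠ 0 := by omega
        unfold ewdCum
        rw [e1, e2, e3]
        split_ifs <;> first | exact ‹False›.elim | omega

-- A's running total after levels 1..n equals B's closed form, and A's dict has exactly
-- B's entries, in order.  One induction over the level range.
lemma ewd_fold (n : Nat) :
    (PySem.List.pyRange 1 ((n : Int) + 1) 1).foldl ewdStep (0, PySem.Dict.empty.insert 0 "-")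
    = ((if n = 0 then 0 else ewdCum n),
       PySem.Dict.mk ((0, "-") ::
         (PySem.List.pyRange 1 ((n : Int) + 1) 1).map (fun lvl => (lvl, pySi (ewdCum lvl))))) := by
  induction n with
  | zero =>
      rw [PySem.List.pyRange_one_eq_nil (by norm_num)]
      decide
  | succ n ih =>
      have h1 : (1 : Int) ≤ (n : Int) + 1 := by omega
      have hrange : PySem.List.pyRange 1 ((↑(n + 1) : Int) + 1) 1
          = PySem.List.pyRange 1 ((n : Int) + 1) 1 ++ [(n : Int) + 1] := by
        push_cast
        exact PySem.List.pyRange_one_succ_right h1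
      rw [hrange, List.foldl_append, ih, List.map_append, List.foldl_cons, List.foldl_nil]
      have htot := ewd_total_step n
      have hfresh : (PySem.Dict.mk ((0, "-") ::
          (PySem.List.pyRange 1 ((n : Int) + 1) 1).map
            (fun lvl => (lvl, pySi (ewdCum lvl))))).contains ((n : Int) + 1) = false := by
        rw [PySem.Dict.contains_eq_decide_mem_keys]
        simp only [PySem.Dict.keys_mk, List.map_cons, List.map_map, decide_eq_false_iff_not,
          List.mem_cons, Function.comp_def]
        rintro (h | h)
        · omega
        · simp only [List.mem_map] at h
          obtain ⟨lvl, hlvl, hl⟩ := h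
          rw [PySem.List.mem_pyRange_one] at hlvl
          omega
      unfold ewdStep
      simp only [Prod.mk.injEq]
      constructor
      · exact htot
      · apply PySem.Dict.ext
        rw [PySem.Dict.items_insert, hfresh]
        simp only [Bool.false_eq_true, if_false, htot, List.map_cons,
          List.map_nil, List.cons_append]

-- ===== VERDICT (by name: the statement is the Claim_ definition above) =====
theorem ewd_cumulative_costs_py_spec : Claim_equal_ewd_cumulative_costs_py := by
  intro max_lvl _ _
  unfold Spec_ewd_cumulative_costs_py ewd_cumulative_costs_py ewd_cumulative_costs_py_alt
  by_cases h : max_lvl ≤ 0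
  · rw [PySem.List.pyRange_one_eq_nil (by omega)]
    decide
  · obtain ⟨n, hn⟩ : ∃ n : Nat, max_lvl = (n : Int) :=
      ⟨max_lvl.toNat, (Int.toNat_of_nonneg (by omega)).symm⟩
    subst hn
    rw [ewd_fold n]
    have hmap : (PySem.List.pyRange 1 ((n : Int) + 1) 1).map (fun lvl => (lvl, pySi (ewdCum lvl)))
        = (PySem.List.pyRange 1 ((n : Int) + 1) 1).map (fun lvl => (lvl, siB (ewdCum lvl))) :=
      List.map_congr_left (fun lvl _ => by rw [si_eq])
    simp only [hmap]
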